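-- pv_equiv track=rewrite | github.com/vishnudk/algorithms | stickcut.py | function
-- ===== SOURCE A (Python) =====
-- def function(arr):
--     l=[]
--     while len(arr)!=0:
--         l.append(len(arr))
--         m=min(arr)
--         arr1=[]
--         for i in arr:
--             if i!=m:
--                 arr1.append(i)
--         arr=[]
--         arr=arr1.copy()
--     return l
-- ===== SOURCE B (Python) =====
-- def function(arr):
--     s = sorted(arr)
--     out = []
--     prev = None
--     rem = len(s)
--     for x in s:
--         if prev is None or x != prev:
--             out.append(rem)
--         prev = x
--         rem -= 1
--     return out
-- ===== Notes on version B (the rewrite author's own statement) =====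
-- stated objective: faster
-- what changed: Instead of repeatedly scanning the list to find and remove all minima (one pass per distinct value), B sorts once and does a single scan emitting the remaining count at every position where the value changes.
import Mathlib
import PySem

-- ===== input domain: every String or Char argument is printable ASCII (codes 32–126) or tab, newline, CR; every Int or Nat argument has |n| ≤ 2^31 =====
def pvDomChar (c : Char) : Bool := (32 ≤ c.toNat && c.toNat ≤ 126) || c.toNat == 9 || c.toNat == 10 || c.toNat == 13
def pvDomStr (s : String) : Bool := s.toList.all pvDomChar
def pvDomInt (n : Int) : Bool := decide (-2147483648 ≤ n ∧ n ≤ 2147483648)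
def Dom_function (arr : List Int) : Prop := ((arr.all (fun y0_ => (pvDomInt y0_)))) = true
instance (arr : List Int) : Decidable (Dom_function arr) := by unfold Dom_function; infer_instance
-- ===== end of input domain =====

-- B replaces A's repeated remove-all-minima passes by one sort plus a single change-point scan.

-- ===== PORT A =====
-- A's inner for-loop builds arr without its minimum; these two facts justify termination of the while loop
theorem pv_loopA_filter (m : Int) (arr : List Int) :
    arr.foldl (fun acc i => if i ≠ m then acc ++ [i] else acc) [] =
      arr.filter (fun i => decide (i ≠ m)) := by
  have h := PySem.List.foldl_append_if (fun i => decide (i ≠ m)) id arr []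
  simpa using h

theorem pv_filter_lt (arr : List Int) (m : Int) (hm : m ∈ arr) :
    (arr.filter (fun i => decide (i ≠ m))).length < arr.length := by
  apply List.length_filter_lt_length_iff_exists.mpr
  exact ⟨m, hm, by simp⟩

def functionGo (arr : List Int) (l : List Int) : List Int :=
  if arr.length ≠ 0 then
    match hm : PySem.List.min? arr (fun x => x) with
    | some m =>
        functionGo (arr.foldl (fun acc i => if i ≠ m then acc ++ [i] else acc) [])
          (l ++ [(arr.length : Int)])
    | none => l ++ [(arr.length : Int)]   -- unreachable: arr is nonempty here
  else l
termination_by arr.length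
decreasing_by
  simp only [dite_eq_ite]
  rw [List.foldl_attach (f := fun acc i => if i ≠ m then acc ++ [i] else acc)]
  rw [pv_loopA_filter]
  exact pv_filter_lt arr m (PySem.List.min?_mem hm)

def function (arr : List Int) : List Int := functionGo arr []

-- ===== PORT B =====
-- one iteration of B's for-loop; state = (out, prev, rem)
def altStep (st : List Int × Option Int × Int) (x : Int) : List Int × Option Int × Int :=
  (if st.2.1 = none ∨ some x ≠ st.2.1 then st.1 ++ [st.2.2] else st.1, some x, st.2.2 - 1)

def function_alt (arr : List Int) : List Int :=
  let s := PySem.List.sorted arr (fun x => x)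
  (s.foldl altStep ([], none, (s.length : Int))).1

-- ===== PRECONDITION & SPEC =====
def Spec_function (arr : List Int) (out : List Int) : Prop := out = function_alt arr
instance (arr : List Int) (out : List Int) : Decidable (Spec_function arr out) := by unfold Spec_function; infer_instance

-- ===== CLAIM (what is proved, stated in full; the proofs are below) =====
def Claim_equal_function : Prop := ∀ (arr : List Int), Dom_function arr → Spec_function arr (function arr)

-- ===== LEMMAS AND PROOFS =====

-- the out-component of B's loop only grows: the accumulator splits off
theorem alt_acc (s : List Int) : ∀ (out : List Int) (p : Option Int) (r : Int),
    (s.foldl altStep (out, p, r)).1 = out ++ (s.foldl altStep ([], p, r)).1 := by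
  induction s with
  | nil => intro out p r; simp
  | cons x t ih =>
      intro out p r
      simp only [List.foldl_cons, altStep]
      by_cases hc : p = none ∨ some x ≠ p
      · simp only [if_pos hc, List.nil_append]
        rw [ih (out ++ [r]) (some x) (r - 1), ih [r] (some x) (r - 1), List.append_assoc]
      · simp only [if_neg hc]
        rw [ih out (some x) (r - 1)]

-- a run of copies of the current previous value emits nothing
theorem alt_replicate (j : Nat) : ∀ (out : List Int) (m r : Int),
    (List.replicate j m).foldl altStep (out, some m, r) = (out, some m, r - j) := by
  induction j with
  | zero => intro out m r; simp
  | succ k ih =>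
      intro out m r
      rw [List.replicate_succ]
      simp only [List.foldl_cons, altStep]
      rw [if_neg (by simp)]
      rw [ih]
      rw [show r - 1 - (k : Int) = r - ((k + 1 : Nat) : Int) from by push_cast; ring]

-- when no upcoming element equals the previous value, prev = some m behaves like prev = none
theorem alt_fresh (s : List Int) {m : Int} (h : ∀ x ∈ s, x ≠ m) (out : List Int) (r : Int) :
    (s.foldl altStep (out, some m, r)).1 = (s.foldl altStep (out, none, r)).1 := by
  cases s with
  | nil => rfl
  | cons x t =>
      simp only [List.foldl_cons, altStep]
      have h1 : (some m = none ∨ some x ≠ some m) :=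
        Or.inr (by simpa using h x (by simp))
      rw [if_pos h1]
      simp only [true_or, if_true]

-- sorted arr starts with all copies of the minimum, followed by sorted of the rest
theorem sorted_decomp (arr : List Int) (m : Int)
    (hm : PySem.List.min? arr (fun x => x) = some m) :
    PySem.List.sorted arr (fun x => x) =
      List.replicate (arr.count m) m ++
        PySem.List.sorted (arr.filter (fun i => decide (i ≠ m))) (fun x => x) := by
  have hmin := PySem.List.min?_isMin hm
  have hfe : arr.filter (fun x => !(x == m)) = arr.filter (fun i => decide (i ≠ m)) := by
    apply List.filter_congr; intro x _; simp only [ne_eq, decide_not]; rfl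
  have hperm : (List.replicate (arr.count m) m ++
      PySem.List.sorted (arr.filter (fun i => decide (i ≠ m))) (fun x => x)).Perm arr := by
    have h1 : (arr.filter (fun x => x == m) ++ arr.filter (fun x => !(x == m))).Perm arr :=
      List.filter_append_perm _ arr
    rw [List.filter_beq, hfe] at h1
    exact ((PySem.List.sorted_perm _ _ _).append_left _).trans h1
  apply PySem.List.eq_of_perm_of_pairwise_le_of_injective (fun x => x) (fun a b h => h)
  · exact (PySem.List.sorted_perm _ _ _).trans hperm.symm
  · exact PySem.List.sorted_pairwise _ _
  · rw [List.pairwise_append]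
    refine ⟨List.pairwise_replicate.mpr (Or.inr le_rfl),
      PySem.List.sorted_pairwise _ _, ?_⟩
    intro a ha b hb
    rw [List.eq_of_mem_replicate ha]
    have hb' : b ∈ arr.filter (fun i => decide (i ≠ m)) :=
      (PySem.List.mem_sorted _ _ _ _).mp hb
    exact hmin b (List.mem_of_mem_filter hb')

-- B's recurrence: the sorted list is one minimum-run followed by the rest, so the scan
-- emits the total length and then behaves like the scan of the filtered list
theorem alt_rec (arr : List Int) (m : Int)
    (hm : PySem.List.min? arr (fun x => x) = some m) :
    function_alt arr =
      (arr.length : Int) :: function_alt (arr.filter (fun i => decide (i ≠ m))) := by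
  have hmem := PySem.List.min?_mem hm
  have hk : 0 < arr.count m := List.count_pos_iff.mpr hmem
  obtain ⟨k', hk'⟩ : ∃ k', arr.count m = k' + 1 := ⟨arr.count m - 1, by omega⟩
  have hlen : arr.length = arr.count m + (arr.filter (fun i => decide (i ≠ m))).length := by
    have h1 := (List.filter_append_perm (fun x : Int => x == m) arr).length_eq
    have hfe : arr.filter (fun x => !(x == m)) = arr.filter (fun i => decide (i ≠ m)) := by
      apply List.filter_congr; intro x _; simp only [ne_eq, decide_not]; rfl
    rw [List.length_append, List.filter_beq, List.length_replicate, hfe] at h1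
    omega
  have hfresh : ∀ x ∈ PySem.List.sorted (arr.filter (fun i => decide (i ≠ m))) (fun x => x),
      x ≠ m := by
    intro x hx
    have := (PySem.List.mem_sorted _ _ _ _).mp hx
    simpa using (List.mem_filter.mp this).2
  have key : ∀ (r : Int) (s' : List Int), (∀ x ∈ s', x ≠ m) →
      (((List.replicate (k' + 1) m ++ s').foldl altStep ([], none, r)).1 : List Int) =
        r :: (s'.foldl altStep ([], none, r - (k' + 1)) ).1 := by
    intro r s' hs'
    rw [List.foldl_append, List.replicate_succ]
    simp only [List.foldl_cons, altStep]
    simp only [true_or, if_true, List.nil_append]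
    rw [alt_replicate k' [r] m (r - 1)]
    rw [alt_fresh s' hs']
    rw [alt_acc]
    have : r - 1 - (k' : Int) = r - ((k' : Int) + 1) := by ring
    rw [this]
    rfl
  simp only [function_alt]
  rw [sorted_decomp arr m hm, hk']
  rw [key _ _ hfresh]
  have hA : ((List.replicate (k' + 1) m ++
      PySem.List.sorted (arr.filter (fun i => decide (i ≠ m))) (fun x => x)).length : Int)
      = (arr.length : Int) := by
    simp only [List.length_append, List.length_replicate, PySem.List.length_sorted]
    omega
  rw [hA]
  congr 1
  have hB : (arr.length : Int) - ((k' : Int) + 1) =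
      ((PySem.List.sorted (arr.filter (fun i => decide (i ≠ m))) (fun x => x)).length : Int) := by
    rw [PySem.List.length_sorted]
    omega
  rw [hB]

-- A's accumulator splits off
theorem go_acc : ∀ (n : Nat) (arr l : List Int), arr.length ≤ n →
    functionGo arr l = l ++ functionGo arr [] := by
  intro n
  induction n with
  | zero =>
      intro arr l h
      have harr : arr = [] := List.eq_nil_of_length_eq_zero (by omega)
      subst harr
      simp [functionGo]
  | succ n ih =>
      intro arr l h
      rw [functionGo.eq_def]
      conv_rhs => rw [functionGo.eq_def (arr := arr) (l := [])]
      by_cases ha : arr.length ≠ 0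
      · rw [if_pos ha, if_pos ha]
        split
        · rename_i m hm
          have hlt : (arr.foldl (fun acc i => if i ≠ m then acc ++ [i] else acc) []).length
              < arr.length := by
            rw [pv_loopA_filter]; exact pv_filter_lt arr m (PySem.List.min?_mem hm)
          rw [ih _ (l ++ [(arr.length : Int)]) (by omega),
              ih _ ([] ++ [(arr.length : Int)]) (by omega)]
          simp
        · simp
      · rw [if_neg ha, if_neg ha]
        simp

-- A's recurrence: one iteration of the while loop
theorem a_rec (arr : List Int) (m : Int)
    (hm : PySem.List.min? arr (fun x => x) = some m) :
    function arr = (arr.length : Int) :: function (arr.filter (fun i => decide (i ≠ m))) := by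
  have ha : arr.length ≠ 0 := by
    intro h0
    rw [List.eq_nil_of_length_eq_zero h0,
      (PySem.List.min?_eq_none_iff ([] : List Int) (fun x => x)).mpr rfl] at hm
    cases hm
  show functionGo arr [] = _
  rw [functionGo.eq_def, if_pos ha]
  split
  · rename_i m' hm'
    rw [hm'] at hm
    have hmm : m' = m := by injection hm
    subst hmm
    rw [pv_loopA_filter]
    rw [go_acc (arr.filter (fun i => decide (i ≠ m'))).length _ _ le_rfl]
    rfl
  · rename_i hm'
    rw [hm'] at hm
    cases hm

theorem main_eq : ∀ (n : Nat) (arr : List Int), arr.length ≤ n →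
    function arr = function_alt arr := by
  intro n
  induction n with
  | zero =>
      intro arr h
      have harr : arr = [] := List.eq_nil_of_length_eq_zero (by omega)
      subst harr
      have h1 : function [] = [] := by
        rw [function, functionGo.eq_def]; simp
      rw [h1]; rfl
  | succ n ih =>
      intro arr h
      cases hm : PySem.List.min? arr (fun x => x) with
      | none =>
          have harr : arr = [] := (PySem.List.min?_eq_none_iff _ _).mp hm
          subst harr
          have h1 : function [] = [] := by
            rw [function, functionGo.eq_def]; simp
          rw [h1]; rfl
      | some m =>
          have hmem := PySem.List.min?_mem hm
          have hlt : (arr.filter (fun i => decide (i ≠ m))).length < arr.length :=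
            pv_filter_lt arr m hmem
          rw [a_rec arr m hm, alt_rec arr m hm, ih _ (by omega)]

-- ===== VERDICT (by name: the statement is the Claim_ definition above) =====
theorem function_spec : Claim_equal_function := by
  intro arr _
  unfold Spec_function
  exact main_eq arr.length arr le_rfl
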